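-- pv_equiv track=rewrite | github.com/nathanvid/InfinityMageNovel | scripts/translation/infinity_response_parser.py | _detect_place_context
-- ===== SOURCE A (Python) =====
-- def _detect_place_context(english: str, context: str) -> bool:
--     """Detect if a term should be categorized as a place"""
--     place_indicators = [
--         'city', 'town', 'village', 'district', 'area', 'region', 'place', 'location',
--         'school', 'academy', 'library', 'building', 'house', 'palace', 'castle',
--         'kingdom', 'empire', 'nation', 'country', 'forest', 'mountain', 'valley',
--         'street', 'alley', 'road', 'path', 'gate', 'door', 'room', 'hall'
--     ]
--
--     context_lower = context.lower()
--     english_lower = english.lower()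
--
--     for indicator in place_indicators:
--         if indicator in context_lower or indicator in english_lower:
--             return True
--
--     return False
-- ===== SOURCE B (Python) =====
-- def _detect_place_context(english: str, context: str) -> bool:
--     """Detect if a term should be categorized as a place"""
--     place_indicators = [
--         'city', 'town', 'village', 'district', 'area', 'region', 'place', 'location',
--         'school', 'academy', 'library', 'building', 'house', 'palace', 'castle',
--         'kingdom', 'empire', 'nation', 'country', 'forest', 'mountain', 'valley',
--         'street', 'alley', 'road', 'path', 'gate', 'door', 'room', 'hall'
--     ]
--
--     # Index the indicators by their first letter, then make one left-to-right
--     # scan over a single combined lowercased text; the '\n' separator cannot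
--     # occur in any indicator, so no match can cross the boundary.
--     by_first = {}
--     for ind in place_indicators:
--         by_first.setdefault(ind[0], []).append(ind)
--
--     text = context.lower() + "\n" + english.lower()
--     for i, ch in enumerate(text):
--         for ind in by_first.get(ch, []):
--             if text.startswith(ind, i):
--                 return True
--     return False
-- ===== Notes on version B (the rewrite author's own statement) =====
-- stated objective: alternative
-- what changed: B builds a dict indexing the 30 indicators by first letter and makes a single left-to-right scan over one combined lowercased text (context + ' ' + english), testing startswith only for indicators whose first letter matches the current character, instead of A's separate 'indicator in string' substring search per indicator over each of the two strings.
import Mathlib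
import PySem

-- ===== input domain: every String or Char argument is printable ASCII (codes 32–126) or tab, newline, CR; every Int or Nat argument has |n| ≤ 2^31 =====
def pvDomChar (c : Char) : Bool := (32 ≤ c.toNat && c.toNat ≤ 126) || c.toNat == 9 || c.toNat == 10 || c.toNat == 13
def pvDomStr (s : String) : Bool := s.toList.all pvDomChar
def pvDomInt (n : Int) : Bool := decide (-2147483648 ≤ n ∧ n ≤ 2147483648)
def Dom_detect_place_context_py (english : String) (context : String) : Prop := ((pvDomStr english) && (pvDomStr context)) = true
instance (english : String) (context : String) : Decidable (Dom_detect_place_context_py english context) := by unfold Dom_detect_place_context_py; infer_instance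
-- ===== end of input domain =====

-- B replaces A's per-indicator double substring search by a first-letter index of the
-- indicators and a single left-to-right scan over one combined lowercased text (alternative
-- decomposition; return value only, no side effects either way).

-- ===== PORT A =====
def pvPlaceIndicators : List String :=
  ["city", "town", "village", "district", "area", "region", "place", "location",
   "school", "academy", "library", "building", "house", "palace", "castle",
   "kingdom", "empire", "nation", "country", "forest", "mountain", "valley",
   "street", "alley", "road", "path", "gate", "door", "room", "hall"]

-- the for-loop with early 'return True' and final 'return False' is List.any
def detect_place_context_py (english : String) (context : String) : Bool :=
  let contextLower := PySem.Str.lower context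
  let englishLower := PySem.Str.lower english
  pvPlaceIndicators.any (fun ind =>
    PySem.Str.isIn ind contextLower || PySem.Str.isIn ind englishLower)

-- ===== PORT B =====
-- ind[0]; exact for nonempty ind (every indicator is a nonempty literal)
def pvFirstChar (s : String) : Char := s.toList.headI

-- by_first: dict first letter -> indicators starting with it (setdefault(…, []).append(ind))
def pvByFirst : PySem.Dict Char (List String) :=
  pvPlaceIndicators.foldl (fun d ind => d.modify (pvFirstChar ind) [] (· ++ [ind])) PySem.Dict.empty

-- 'for i, ch in enumerate(text): for ind in by_first.get(ch, []): if text.startswith(ind, i): return True'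
-- text.startswith(ind, i) with 0 ≤ i ≤ len(text) is exactly: ind is a prefix of text[i:]
def pvScan (text : List Char) : Bool :=
  (PySem.List.enumerate text 0).any (fun p =>
    (pvByFirst.getD p.2 []).any (fun ind =>
      PySem.Chars.startswith (text.drop p.1.toNat) ind.toList))

def detect_place_context_py_alt (english : String) (context : String) : Bool :=
  -- text = context.lower() + "\n" + english.lower()
  let text := PySem.Chars.lower context.toList ++ '\n' :: PySem.Chars.lower english.toList
  pvScan text

-- ===== PRECONDITION & SPEC =====
def Spec_detect_place_context_py (english : String) (context : String) (out : Bool) : Prop := out = detect_place_context_py_alt english context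
instance (english : String) (context : String) (out : Bool) : Decidable (Spec_detect_place_context_py english context out) := by unfold Spec_detect_place_context_py; infer_instance

-- ===== CLAIM (what is proved, stated in full; the proofs are below) =====
def Claim_equal_detect_place_context_py : Prop := ∀ (english : String) (context : String), Dom_detect_place_context_py english context → Spec_detect_place_context_py english context (detect_place_context_py english context)

-- ===== LEMMAS AND PROOFS =====

-- every indicator is nonempty and contains no newline
lemma pvInd_ok : ∀ ind ∈ pvPlaceIndicators, ind.toList ≠ [] ∧ '\n' ∉ ind.toList := by decide

-- a prefix of s ++ a :: t is a prefix of s unless it contains a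
lemma pv_prefix_sep {α : Type} {cs s t : List α} {a : α}
    (h : cs <+: s ++ a :: t) : cs <+: s ∨ a ∈ cs := by
  induction s generalizing cs with
  | nil =>
    cases cs with
    | nil => exact Or.inl (List.nil_prefix)
    | cons c cs' =>
      rcases List.cons_prefix_cons.mp h with ⟨rfl, -⟩
      exact Or.inr (List.mem_cons_self)
  | cons b s' ih =>
    cases cs with
    | nil => exact Or.inl (List.nil_prefix)
    | cons c cs' =>
      rcases List.cons_prefix_cons.mp h with ⟨rfl, h'⟩
      rcases ih h' with h1 | h2
      · exact Or.inl (List.cons_prefix_cons.mpr ⟨rfl, h1⟩)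
      · exact Or.inr (List.mem_cons_of_mem _ h2)

-- an infix of s ++ a :: t not containing a is an infix of s or of t
lemma pv_infix_sep {α : Type} {cs s t : List α} {a : α}
    (h : cs <:+: s ++ a :: t) (ha : a ∉ cs) : cs <:+: s ∨ cs <:+: t := by
  induction s generalizing cs with
  | nil =>
    rcases List.infix_cons_iff.mp h with h1 | h2
    · rcases pv_prefix_sep (s := []) (by simpa using h1) with h3 | h4
      · exact Or.inl h3.isInfix
      · exact absurd h4 ha
    · exact Or.inr h2
  | cons b s' ih =>
    rcases List.infix_cons_iff.mp h with h1 | h2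
    · rcases pv_prefix_sep (s := b :: s') (by simpa using h1) with h3 | h4
      · exact Or.inl h3.isInfix
      · exact absurd h4 ha
    · rcases ih h2 ha with h3 | h4
      · exact Or.inl (h3.trans (List.suffix_cons b s').isInfix)
      · exact Or.inr h4

-- membership in the first-letter index
lemma pv_mem_byFirst (ch : Char) (ind : String) :
    ind ∈ pvByFirst.getD ch [] ↔ ind ∈ pvPlaceIndicators ∧ pvFirstChar ind = ch := by
  have h : pvByFirst = (pvPlaceIndicators.map (fun s => (pvFirstChar s, s))).foldl
      (fun d p => d.modify p.1 [] (· ++ [p.2])) PySem.Dict.empty := by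
    simp [pvByFirst, List.foldl_map]
  rw [h, PySem.Dict.getD_foldl_modify_append]
  simp only [PySem.Dict.getD_empty, List.nil_append, List.mem_map, List.mem_filter, beq_iff_eq]
  constructor
  · rintro ⟨p, ⟨⟨s, hs, rfl⟩, hc⟩, rfl⟩; exact ⟨hs, hc⟩
  · rintro ⟨hs, hc⟩; exact ⟨(pvFirstChar ind, ind), ⟨⟨ind, hs, rfl⟩, hc⟩, rfl⟩

-- the scan finds exactly the indicators occurring as infixes of the text
lemma pv_scan_iff (text : List Char) :
    pvScan text = true ↔ ∃ ind ∈ pvPlaceIndicators, ind.toList <:+: text := by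
  unfold pvScan
  rw [List.any_eq_true]
  constructor
  · rintro ⟨p, hp, hbody⟩
    rcases (PySem.List.mem_enumerate_iff _ _ _).mp hp with ⟨k, hk, rfl⟩
    rcases List.any_eq_true.mp hbody with ⟨ind, hind, hpre⟩
    have hmem := (pv_mem_byFirst _ _).mp hind
    have hpre' := (PySem.Chars.startswith_iff _ _).mp hpre
    exact ⟨ind, hmem.1, hpre'.isInfix.trans (List.drop_suffix _ _).isInfix⟩
  · rintro ⟨ind, hind, hinf⟩
    rcases hinf with ⟨pre, suf, hsplit⟩
    rcases pvInd_ok ind hind with ⟨hne, -⟩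
    rcases List.exists_cons_of_ne_nil hne with ⟨c, cs, hcons⟩
    have hk : pre.length < text.length := by
      subst hsplit; simp [hcons]
    have hdrop : text.drop pre.length = ind.toList ++ suf := by
      subst hsplit; simp
    have hget : text[pre.length] = c := by
      have h0 : (text.drop pre.length)[0]'(by simp [hdrop, hcons]) = c := by
        simp [hdrop, hcons]
      simpa [List.getElem_drop] using h0
    refine ⟨((pre.length : Int), text[pre.length]), ?_, ?_⟩
    · exact (PySem.List.mem_enumerate_iff _ _ _).mpr ⟨pre.length, hk, by simp⟩
    · rw [List.any_eq_true]
      refine ⟨ind, (pv_mem_byFirst _ _).mpr ⟨hind, ?_⟩, ?_⟩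
      · simp [pvFirstChar, hget, hcons]
      · simp only [Int.toNat_natCast]
        exact (PySem.Chars.startswith_iff _ _).mpr ⟨suf, hdrop.symm⟩

-- ===== VERDICT (by name: the statement is the Claim_ definition above) =====
theorem detect_place_context_py_spec : Claim_equal_detect_place_context_py := by
  intro english context _
  unfold Spec_detect_place_context_py detect_place_context_py detect_place_context_py_alt
  rw [Bool.eq_iff_iff]
  simp only [List.any_eq_true, Bool.or_eq_true, PySem.Str.isIn_iff_infix, PySem.Str.toList_lower,
    pv_scan_iff]
  constructor
  · rintro ⟨ind, hind, h⟩
    refine ⟨ind, hind, ?_⟩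
    rcases h with h | h
    · exact h.trans (List.prefix_append _ _).isInfix
    · exact h.trans ((List.suffix_cons _ _).trans (List.suffix_append _ _)).isInfix
  · rintro ⟨ind, hind, h⟩
    exact ⟨ind, hind, pv_infix_sep h (pvInd_ok ind hind).2⟩
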